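-- pv_equiv track=rewrite | github.com/Angelmudc/app_web | utils/pasaje_mode.py | strip_pasaje_marker_from_note
-- ===== SOURCE A (Python) =====
-- from typing import Any
--
-- PASAJE_MARKER_PREFIX = "Pasaje (otro):"
--
-- def _to_text(value: Any) -> str:
--     return str(value or "").strip()
--
-- def strip_pasaje_marker_from_note(note_text: Any) -> str:
--     note = _to_text(note_text)
--     if not note:
--         return ""
--
--     out: list[str] = []
--     for raw_line in note.splitlines():
--         line = raw_line.strip()
--         if line.startswith(PASAJE_MARKER_PREFIX):
--             continue
--         if not line:
--             if out and out[-1] != "":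
--                 out.append("")
--             continue
--         out.append(line)
--
--     while out and out[-1] == "":
--         out.pop()
--     return "\n".join(out)
-- ===== SOURCE B (Python) =====
-- from itertools import groupby
-- from typing import Any
--
-- PASAJE_MARKER_PREFIX = "Pasaje (otro):"
--
-- def _to_text(value: Any) -> str:
--     return str(value or "").strip()
--
-- def strip_pasaje_marker_from_note(note_text: Any) -> str:
--     note = _to_text(note_text)
--     if not note:
--         return ""
--
--     kept = [line for line in (raw.strip() for raw in note.splitlines())
--             if not line.startswith(PASAJE_MARKER_PREFIX)]
--
--     out: list[str] = []
--     for is_blank, group in groupby(kept, key=lambda l: l == ""):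
--         if is_blank:
--             out.append("")
--         else:
--             out.extend(group)
--
--     # groupby leaves at most one blank at each edge; trim them
--     if out and out[0] == "":
--         out = out[1:]
--     if out and out[-1] == "":
--         out = out[:-1]
--     return "\n".join(out)
-- ===== Notes on version B (the rewrite author's own statement) =====
-- stated objective: idiomatic
-- what changed: Replaces A's single stateful loop (which interleaves marker filtering, blank collapsing via last-element inspection, and a trailing while-pop) with a declarative pipeline: comprehension-filter the stripped lines, collapse blank runs with itertools.groupby, then trim the single possible blank at each edge.
import Mathlib
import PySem

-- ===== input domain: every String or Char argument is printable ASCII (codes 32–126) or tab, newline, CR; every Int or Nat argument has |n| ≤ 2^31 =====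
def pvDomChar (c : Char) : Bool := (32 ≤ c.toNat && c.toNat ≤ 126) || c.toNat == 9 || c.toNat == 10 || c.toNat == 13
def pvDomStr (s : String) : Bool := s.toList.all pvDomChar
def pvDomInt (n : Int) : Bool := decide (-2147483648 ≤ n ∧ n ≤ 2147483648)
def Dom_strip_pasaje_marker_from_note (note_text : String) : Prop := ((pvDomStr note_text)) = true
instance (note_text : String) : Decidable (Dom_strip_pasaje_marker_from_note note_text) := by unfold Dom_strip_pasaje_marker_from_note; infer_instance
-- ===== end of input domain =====

-- B replaces A's stateful accumulator loop by a filter → groupby-run collapse → edge-trim pipeline (idiomatic decomposition; same cost).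


-- ===== PORT A =====
def pvMarker : String := "Pasaje (otro):"

-- A's for-loop over the raw lines, with accumulator `out`
def pvALoop : List String → List String → List String
  | out, [] => out
  | out, raw :: rest =>
    let line := PySem.Str.strip raw
    if PySem.Str.startswith line pvMarker then pvALoop out rest
    else if line = "" then
      if out ≠ [] ∧ out.getLast? ≠ some "" then pvALoop (out ++ [""]) rest
      else pvALoop out rest
    else pvALoop (out ++ [line]) rest

-- A's `while out and out[-1] == "": out.pop()`
def pvPopTrailing (out : List String) : List String :=
  if out.getLast? = some "" then pvPopTrailing out.dropLast else out
termination_by out.length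
decreasing_by
  rename_i h
  have hne : out ≠ [] := by intro he; subst he; simp at h
  have hp : 0 < out.length := List.length_pos_of_ne_nil hne
  rw [List.length_dropLast]; omega

def strip_pasaje_marker_from_note (note_text : String) : String :=
  let note := PySem.Str.strip note_text   -- _to_text: str(value or "").strip() — on a String this is exactly strip
  if note = "" then ""
  else PySem.Str.join "\n" (pvPopTrailing (pvALoop [] (PySem.Str.splitlines note)))

-- ===== PORT B =====
-- B's groupby loop: one "" per blank run, content lines copied through
def pvCollapse : List String → List String
  | [] => []
  | l :: t =>
    if l = "" then "" :: pvCollapse (t.dropWhile (· = ""))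
    else l :: pvCollapse t
termination_by ls => ls.length
decreasing_by
  · have := List.length_dropWhile_le (fun x => x = "") t; simp; omega
  · simp

def strip_pasaje_marker_from_note_alt (note_text : String) : String :=
  let note := PySem.Str.strip note_text
  if note = "" then ""
  else
    let kept := ((PySem.Str.splitlines note).map PySem.Str.strip).filter
        (fun l => !(PySem.Str.startswith l pvMarker))
    let out := pvCollapse kept
    let out := if out ≠ [] ∧ out.head? = some "" then PySem.List.slice out (some 1) none else out
    let out := if out ≠ [] ∧ out.getLast? = some "" then PySem.List.slice out none (some (-1)) else out
    PySem.Str.join "\n" out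

-- ===== PRECONDITION & SPEC =====
def Spec_strip_pasaje_marker_from_note (note_text : String) (out : String) : Prop := out = strip_pasaje_marker_from_note_alt note_text
instance (note_text : String) (out : String) : Decidable (Spec_strip_pasaje_marker_from_note note_text out) := by unfold Spec_strip_pasaje_marker_from_note; infer_instance

-- ===== CLAIM (what is proved, stated in full; the proofs are below) =====
def Claim_equal_strip_pasaje_marker_from_note : Prop := ∀ (note_text : String), Dom_strip_pasaje_marker_from_note note_text → Spec_strip_pasaje_marker_from_note note_text (strip_pasaje_marker_from_note note_text)

-- ===== LEMMAS AND PROOFS =====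

-- A's loop restated on the already-stripped, marker-filtered lines
def pvLoopK : List String → List String → List String
  | out, [] => out
  | out, l :: rest =>
    if l = "" then
      if out ≠ [] ∧ out.getLast? ≠ some "" then pvLoopK (out ++ [""]) rest
      else pvLoopK out rest
    else pvLoopK (out ++ [l]) rest

-- the suffix A's loop appends, as a function of the one-bit state
-- (b = "a blank may be emitted now", i.e. out nonempty with nonblank last)
def pvS : Bool → List String → List String
  | _, [] => []
  | b, l :: t => if l = "" then (if b then "" :: pvS false t else pvS b t) else l :: pvS true t

-- no two adjacent blank entries
def pvNoAdj : List String → Prop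
  | [] => True
  | [_] => True
  | a :: b :: t => (a ≠ "" ∨ b ≠ "") ∧ pvNoAdj (b :: t)

theorem pvNoAdj_cons {x : String} {l : List String} (h : pvNoAdj l)
    (hx : ∀ y, l.head? = some y → x ≠ "" ∨ y ≠ "") : pvNoAdj (x :: l) := by
  cases l with
  | nil => trivial
  | cons b t => exact ⟨hx b rfl, h⟩

theorem pvALoop_cons (out : List String) (raw : String) (rest : List String) :
    pvALoop out (raw :: rest) =
      if PySem.Str.startswith (PySem.Str.strip raw) pvMarker then pvALoop out rest
      else if PySem.Str.strip raw = "" then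
        if out ≠ [] ∧ out.getLast? ≠ some "" then pvALoop (out ++ [""]) rest else pvALoop out rest
      else pvALoop (out ++ [PySem.Str.strip raw]) rest := rfl

theorem pvLoopK_cons_blank (out t : List String) :
    pvLoopK out ("" :: t) =
      if out ≠ [] ∧ out.getLast? ≠ some "" then pvLoopK (out ++ [""]) t else pvLoopK out t := by
  simp [pvLoopK]

theorem pvLoopK_cons_ne (out : List String) (l : String) (t : List String) (h : l ≠ "") :
    pvLoopK out (l :: t) = pvLoopK (out ++ [l]) t := by
  simp [pvLoopK, h]

theorem pvALoop_eq_loopK (raws : List String) : ∀ out,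
    pvALoop out raws =
      pvLoopK out ((raws.map PySem.Str.strip).filter (fun l => !(PySem.Str.startswith l pvMarker))) := by
  induction raws with
  | nil => intro out; rfl
  | cons raw rest ih =>
    intro out
    rw [List.map_cons, List.filter_cons, pvALoop_cons]
    by_cases hm : PySem.Str.startswith (PySem.Str.strip raw) pvMarker = true
    · rw [if_pos hm, hm]
      simp only [Bool.not_true, Bool.false_eq_true, if_false]
      exact ih out
    · have hm0 : PySem.Str.startswith (PySem.Str.strip raw) pvMarker = false := by
        cases h' : PySem.Str.startswith (PySem.Str.strip raw) pvMarker
        · rfl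
        · exact absurd h' hm
      rw [if_neg hm, hm0]
      simp only [Bool.not_false, eq_self_iff_true, if_true]
      by_cases hb : PySem.Str.strip raw = ""
      · rw [if_pos hb, hb, pvLoopK_cons_blank]
        by_cases hc : out ≠ [] ∧ out.getLast? ≠ some ""
        · rw [if_pos hc, if_pos hc]; exact ih _
        · rw [if_neg hc, if_neg hc]; exact ih _
      · rw [if_neg hb, pvLoopK_cons_ne _ _ _ hb]; exact ih _

theorem pvLoopK_eq_S (ls : List String) : ∀ out,
    pvLoopK out ls = out ++ pvS (decide (out ≠ [] ∧ out.getLast? ≠ some "")) ls := by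
  induction ls with
  | nil => intro out; simp [pvLoopK, pvS]
  | cons l t ih =>
    intro out
    by_cases hb : l = ""
    · subst hb
      by_cases hc : out ≠ [] ∧ out.getLast? ≠ some ""
      · simp only [pvLoopK, if_pos hc, ih]
        have : ¬((out ++ [""]) ≠ [] ∧ (out ++ [""]).getLast? ≠ some "") := by
          simp
        simp [hc, this, pvS]
      · simp only [pvLoopK, if_neg hc, ih]
        simp [hc, pvS]
    · simp only [pvLoopK, if_neg hb, ih]
      have : ((out ++ [l]) ≠ [] ∧ (out ++ [l]).getLast? ≠ some "") := by
        simp [hb]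
      simp [this, pvS, hb]

theorem pvS_collapse (ls : List String) :
    pvS true ls = pvCollapse ls ∧ pvS false ls = pvCollapse (ls.dropWhile (· = "")) := by
  induction ls with
  | nil => simp [pvS, pvCollapse]
  | cons l t ih =>
    by_cases hb : l = ""
    · subst hb
      constructor
      · rw [pvCollapse]; simp [pvS, ih.2]
      · simpa [pvS, List.dropWhile] using ih.2
    · constructor
      · rw [pvCollapse]; simp [pvS, hb, ih.1]
      · rw [List.dropWhile_cons_of_neg (by simp [hb]), pvCollapse]
        simp [pvS, hb, ih.1]

theorem pvS_noadj (ls : List String) : ∀ b,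
    pvNoAdj (pvS b ls) ∧ (b = false → (pvS b ls).head? ≠ some "") := by
  induction ls with
  | nil => intro b; exact ⟨trivial, by simp [pvS]⟩
  | cons l t ih =>
    intro b
    by_cases hb : l = ""
    · subst hb
      cases b with
      | false => simpa [pvS] using ih false
      | true =>
        have e : pvS true ("" :: t) = "" :: pvS false t := by simp [pvS]
        refine ⟨?_, by simp⟩
        rw [e]
        refine pvNoAdj_cons (ih false).1 ?_
        intro y hy
        right
        intro hy'
        exact (ih false).2 rfl (hy' ▸ hy)
    · have e : pvS b (l :: t) = l :: pvS true t := by simp [pvS, hb]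
      rw [e]
      exact ⟨pvNoAdj_cons (ih true).1 (fun y _ => Or.inl hb), by simp [hb]⟩

theorem pv_last_two (X : List String) (h : pvNoAdj X) (h1 : X.getLast? = some "") :
    X.dropLast.getLast? ≠ some "" := by
  induction X with
  | nil => simp at h1
  | cons a t ih =>
    cases t with
    | nil => simp
    | cons b t' =>
      simp only [pvNoAdj] at h
      obtain ⟨hr, h'⟩ := h
      cases t' with
      | nil =>
        simp at h1
        have ha : a ≠ "" := by
          rcases hr with ha | hb
          · exact ha
          · exact absurd h1 hb
        show ([a] : List String).getLast? ≠ some ""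
        simp [ha]
      | cons c t'' =>
        have h1' : (b :: c :: t'').getLast? = some "" := by simpa using h1
        have hres := ih h' h1'
        show (a :: b :: (c :: t'').dropLast).getLast? ≠ some ""
        rw [List.getLast?_cons_cons]
        exact hres

theorem pvPopTrailing_eq (X : List String) (h : pvNoAdj X) :
    pvPopTrailing X = if X.getLast? = some "" then X.dropLast else X := by
  by_cases h1 : X.getLast? = some ""
  · rw [pvPopTrailing, if_pos h1, if_pos h1, pvPopTrailing, if_neg (pv_last_two X h h1)]
  · rw [pvPopTrailing, if_neg h1, if_neg h1]

theorem pv_headtrim_eq_S (ls : List String) :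
    (if pvCollapse ls ≠ [] ∧ (pvCollapse ls).head? = some "" then
        PySem.List.slice (pvCollapse ls) (some 1) none else pvCollapse ls) = pvS false ls := by
  cases ls with
  | nil => simp [pvCollapse, pvS]
  | cons l t =>
    by_cases hb : l = ""
    · subst hb
      rw [pvCollapse]
      simp [PySem.List.slice_from_one, (pvS_collapse ("" :: t)).2, List.dropWhile]
    · rw [pvCollapse, if_neg hb]
      have h2 := (pvS_collapse (l :: t)).2
      rw [List.dropWhile_cons_of_neg (by simp [hb]), pvCollapse, if_neg hb] at h2
      simp [hb, h2]

theorem pv_final (ls : List String) :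
    pvPopTrailing (pvS false ls) =
      (if (if pvCollapse ls ≠ [] ∧ (pvCollapse ls).head? = some "" then
            PySem.List.slice (pvCollapse ls) (some 1) none else pvCollapse ls) ≠ [] ∧
          (if pvCollapse ls ≠ [] ∧ (pvCollapse ls).head? = some "" then
            PySem.List.slice (pvCollapse ls) (some 1) none else pvCollapse ls).getLast? = some "" then
        PySem.List.slice
          (if pvCollapse ls ≠ [] ∧ (pvCollapse ls).head? = some "" then
            PySem.List.slice (pvCollapse ls) (some 1) none else pvCollapse ls) none (some (-1))
      else
        (if pvCollapse ls ≠ [] ∧ (pvCollapse ls).head? = some "" then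
            PySem.List.slice (pvCollapse ls) (some 1) none else pvCollapse ls)) := by
  rw [pvPopTrailing_eq _ (pvS_noadj ls false).1, ← pv_headtrim_eq_S ls]
  generalize (if pvCollapse ls ≠ [] ∧ (pvCollapse ls).head? = some "" then
      PySem.List.slice (pvCollapse ls) (some 1) none else pvCollapse ls) = out2
  by_cases h1 : out2.getLast? = some ""
  · have hne : out2 ≠ [] := by intro he; rw [he] at h1; simp at h1
    rw [if_pos h1, if_pos ⟨hne, h1⟩, PySem.List.slice_to_neg_one]
  · rw [if_neg h1, if_neg (fun hc => h1 hc.2)]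

-- ===== VERDICT (by name: the statement is the Claim_ definition above) =====
theorem strip_pasaje_marker_from_note_spec : Claim_equal_strip_pasaje_marker_from_note := by
  intro note_text _
  unfold Spec_strip_pasaje_marker_from_note
  simp only [strip_pasaje_marker_from_note, strip_pasaje_marker_from_note_alt]
  by_cases hn : PySem.Str.strip note_text = ""
  · rw [if_pos hn, if_pos hn]
  · rw [if_neg hn, if_neg hn]
    rw [pvALoop_eq_loopK, pvLoopK_eq_S, List.nil_append]
    have hd : (decide ((([] : List String)) ≠ [] ∧ ([] : List String).getLast? ≠ some "")) = false := by
      decide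
    rw [hd, pv_final]
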